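-- pv_equiv track=rewrite | github.com/colintrachte/PythonMacros | frontend.py | convert_to_klipper_format
-- ===== SOURCE A (Python) =====
-- def convert_to_klipper_format(lines):
--     """Convert G-code to Klipper-compatible format."""
--     converted_lines = []
--     for line in lines:
--         line = line.strip()
--         if line.startswith("G1") and "S" in line:
--             parts = line.split()
--             x_val, y_val, s_val, f_val = None, None, None, None
--
--             for part in parts:
--                 if part.startswith("X"):
--                     x_val = part[1:]
--                 elif part.startswith("Y"):
--                     y_val = part[1:]
--                 elif part.startswith("S"):
--                     s_val = part[1:]
--                 elif part.startswith("F"):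
--                     f_val = part[1:]
--
--             if s_val is not None:
--                 converted_lines.append(f"SET_PIN PIN=laser VALUE={s_val}\n")
--             if x_val is not None and y_val is not None and f_val is not None:
--                 converted_lines.append(f"G1 X{x_val} Y{y_val} F{f_val}\n")
--         else:
--             converted_lines.append(line + '\n')
--     return converted_lines
-- ===== SOURCE B (Python) =====
-- def convert_to_klipper_format(lines):
--     """Convert G-code to Klipper-compatible format."""
--     def last_value(parts, letter):
--         # first match scanning from the end = last occurrence of the letter
--         for p in reversed(parts):
--             if p.startswith(letter):
--                 return p[1:]
--         return None
--
--     def convert_line(raw):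
--         line = raw.strip()
--         if not (line.startswith("G1") and "S" in line):
--             return [line + "\n"]
--         parts = line.split()
--         out = []
--         s = last_value(parts, "S")
--         if s is not None:
--             out.append(f"SET_PIN PIN=laser VALUE={s}\n")
--         x, y, f = last_value(parts, "X"), last_value(parts, "Y"), last_value(parts, "F")
--         if x is not None and y is not None and f is not None:
--             out.append(f"G1 X{x} Y{y} F{f}\n")
--         return out
--
--     return [o for raw in lines for o in convert_line(raw)]
-- ===== Notes on version B (the rewrite author's own statement) =====
-- stated objective: alternative
-- what changed: B replaces A's single forward pass mutating four Option accumulators through an if/elif chain by a per-letter backwards first-match search (last occurrence = first match from the end) and replaces the shared output-accumulator loop by per-line output lists joined with a flat comprehension; same asymptotic cost.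
import Mathlib
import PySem

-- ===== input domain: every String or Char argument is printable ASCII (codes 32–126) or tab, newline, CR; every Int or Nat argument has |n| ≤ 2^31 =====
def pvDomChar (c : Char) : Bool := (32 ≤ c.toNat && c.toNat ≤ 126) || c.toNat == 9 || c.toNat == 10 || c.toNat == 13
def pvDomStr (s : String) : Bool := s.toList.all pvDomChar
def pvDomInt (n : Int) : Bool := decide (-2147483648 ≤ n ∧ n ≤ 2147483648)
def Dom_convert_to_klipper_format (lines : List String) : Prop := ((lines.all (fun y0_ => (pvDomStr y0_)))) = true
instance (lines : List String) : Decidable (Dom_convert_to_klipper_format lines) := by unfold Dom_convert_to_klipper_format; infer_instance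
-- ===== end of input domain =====

-- B restructures A's accumulator loop into per-line output lists joined by a flat map, and replaces the four-option elif state machine by a backwards first-match search per letter (last occurrence wins); a different decomposition of the same cost.


-- ===== PORT A =====
-- the elif chain over the parts of one line, carried as the state (x_val, y_val, s_val, f_val)
def pvStepA (st : Option String × Option String × Option String × Option String) (part : String) :
    Option String × Option String × Option String × Option String :=
  if PySem.Str.startswith part "X" then
    (some (PySem.Str.slice part (some 1) none), st.2.1, st.2.2.1, st.2.2.2)
  else if PySem.Str.startswith part "Y" then
    (st.1, some (PySem.Str.slice part (some 1) none), st.2.2.1, st.2.2.2)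
  else if PySem.Str.startswith part "S" then
    (st.1, st.2.1, some (PySem.Str.slice part (some 1) none), st.2.2.2)
  else if PySem.Str.startswith part "F" then
    (st.1, st.2.1, st.2.2.1, some (PySem.Str.slice part (some 1) none))
  else st

-- one iteration of A's outer loop
def pvLineA (converted_lines : List String) (line₀ : String) : List String :=
  let line := PySem.Str.strip line₀
  if PySem.Str.startswith line "G1" && PySem.Str.isIn "S" line then
    let parts := PySem.Str.split₀ line
    let st := parts.foldl pvStepA (none, none, none, none)
    match st with
    | (x_val, y_val, s_val, f_val) =>
      let converted_lines :=
        match s_val with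
        | some s => converted_lines ++ ["SET_PIN PIN=laser VALUE=" ++ s ++ "\n"]
        | none => converted_lines
      match x_val, y_val, f_val with
      | some x, some y, some f =>
          converted_lines ++ ["G1 X" ++ x ++ " Y" ++ y ++ " F" ++ f ++ "\n"]
      | _, _, _ => converted_lines
  else
    converted_lines ++ [line ++ "\n"]

def convert_to_klipper_format (lines : List String) : List String :=
  lines.foldl pvLineA []

-- ===== PORT B =====
-- last_value: first match scanning the parts from the end (Python's early-return for-loop = find?)
def pvLastValue (parts : List String) (letter : String) : Option String :=
  (parts.reverse.find? (fun p => PySem.Str.startswith p letter)).map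
    (fun p => PySem.Str.slice p (some 1) none)

-- convert_line: the outputs contributed by one input line
def pvConvertLine (raw : String) : List String :=
  let line := PySem.Str.strip raw
  if !(PySem.Str.startswith line "G1" && PySem.Str.isIn "S" line) then
    [line ++ "\n"]
  else
    let parts := PySem.Str.split₀ line
    let out : List String := []
    let out :=
      match pvLastValue parts "S" with
      | some s => out ++ ["SET_PIN PIN=laser VALUE=" ++ s ++ "\n"]
      | none => out
    match pvLastValue parts "X", pvLastValue parts "Y", pvLastValue parts "F" with
    | some x, some y, some f => out ++ ["G1 X" ++ x ++ " Y" ++ y ++ " F" ++ f ++ "\n"]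
    | _, _, _ => out

def convert_to_klipper_format_alt (lines : List String) : List String :=
  lines.flatMap pvConvertLine

-- ===== PRECONDITION & SPEC =====
def Spec_convert_to_klipper_format (lines : List String) (out : List String) : Prop := out = convert_to_klipper_format_alt lines
instance (lines : List String) (out : List String) : Decidable (Spec_convert_to_klipper_format lines out) := by unfold Spec_convert_to_klipper_format; infer_instance

-- ===== CLAIM (what is proved, stated in full; the proofs are below) =====
def Claim_equal_convert_to_klipper_format : Prop := ∀ (lines : List String), Dom_convert_to_klipper_format lines → Spec_convert_to_klipper_format lines (convert_to_klipper_format lines)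

-- ===== LEMMAS AND PROOFS =====

-- a one-char prefix determines the first character, so two distinct one-char prefixes exclude each other
lemma pv_take_one (l : List Char) (c : Char) : [c] <+: l ↔ l.take 1 = [c] := by
  cases l <;> simp [eq_comm]

lemma pv_sw_excl (l : List Char) (c c' : Char) (hne : c ≠ c')
    (h : PySem.Chars.startswith l [c] = true) : PySem.Chars.startswith l [c'] = false := by
  rw [PySem.Chars.startswith_iff, pv_take_one] at h
  rw [Bool.eq_false_iff, Ne, PySem.Chars.startswith_iff, pv_take_one, h]
  intro hc
  exact hne (by injection hc)

-- each component of A's elif step: set iff the part starts with that letter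
lemma pv_stepA_X (st) (p : String) :
    (pvStepA st p).1 = if PySem.Str.startswith p "X" then some (PySem.Str.slice p (some 1) none) else st.1 := by
  unfold pvStepA; split_ifs <;> rfl

lemma pv_sw_str (p : String) (c : Char) (lit : String) (h : lit.toList = [c]) :
    PySem.Str.startswith p lit = PySem.Chars.startswith p.toList [c] := by
  simp [PySem.Str.startswith, h]

lemma pv_stepA_Y (st) (p : String) :
    (pvStepA st p).2.1 = if PySem.Str.startswith p "Y" then some (PySem.Str.slice p (some 1) none) else st.2.1 := by
  unfold pvStepA
  rw [pv_sw_str p 'X' "X" rfl, pv_sw_str p 'Y' "Y" rfl]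
  by_cases hX : PySem.Chars.startswith p.toList ['X'] = true
  · rw [pv_sw_excl p.toList 'X' 'Y' (by decide) hX]; simp [hX]
  · simp only [Bool.not_eq_true] at hX
    rw [hX]; split_ifs <;> simp_all

lemma pv_stepA_S (st) (p : String) :
    (pvStepA st p).2.2.1 = if PySem.Str.startswith p "S" then some (PySem.Str.slice p (some 1) none) else st.2.2.1 := by
  unfold pvStepA
  rw [pv_sw_str p 'X' "X" rfl, pv_sw_str p 'Y' "Y" rfl, pv_sw_str p 'S' "S" rfl]
  by_cases hX : PySem.Chars.startswith p.toList ['X'] = true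
  · rw [pv_sw_excl p.toList 'X' 'S' (by decide) hX]; simp [hX]
  · simp only [Bool.not_eq_true] at hX
    by_cases hY : PySem.Chars.startswith p.toList ['Y'] = true
    · rw [pv_sw_excl p.toList 'Y' 'S' (by decide) hY]; simp [hX, hY]
    · simp only [Bool.not_eq_true] at hY
      rw [hX, hY]; split_ifs <;> simp_all

lemma pv_stepA_F (st) (p : String) :
    (pvStepA st p).2.2.2 = if PySem.Str.startswith p "F" then some (PySem.Str.slice p (some 1) none) else st.2.2.2 := by
  unfold pvStepA
  rw [pv_sw_str p 'X' "X" rfl, pv_sw_str p 'Y' "Y" rfl, pv_sw_str p 'S' "S" rfl, pv_sw_str p 'F' "F" rfl]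
  by_cases hX : PySem.Chars.startswith p.toList ['X'] = true
  · rw [pv_sw_excl p.toList 'X' 'F' (by decide) hX]; simp [hX]
  · simp only [Bool.not_eq_true] at hX
    by_cases hY : PySem.Chars.startswith p.toList ['Y'] = true
    · rw [pv_sw_excl p.toList 'Y' 'F' (by decide) hY]; simp [hX, hY]
    · simp only [Bool.not_eq_true] at hY
      by_cases hS : PySem.Chars.startswith p.toList ['S'] = true
      · rw [pv_sw_excl p.toList 'S' 'F' (by decide) hS]; simp [hX, hY, hS]
      · simp only [Bool.not_eq_true] at hS
        rw [hX, hY, hS]; split_ifs <;> simp_all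

-- A's fold over the parts is B's backwards first-match per letter, layered over the initial state
lemma pv_foldA (parts : List String) (st : Option String × Option String × Option String × Option String) :
    parts.foldl pvStepA st =
      ((pvLastValue parts "X").or st.1, (pvLastValue parts "Y").or st.2.1,
       (pvLastValue parts "S").or st.2.2.1, (pvLastValue parts "F").or st.2.2.2) := by
  induction parts generalizing st with
  | nil => simp [pvLastValue]
  | cons p ps ih =>
      rw [List.foldl_cons, ih]
      have hlast : ∀ L, pvLastValue (p :: ps) L =
          (pvLastValue ps L).or (if PySem.Str.startswith p L then some (PySem.Str.slice p (some 1) none) else none) := by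
        intro L
        simp only [pvLastValue, List.reverse_cons, List.find?_append]
        cases h : List.find? (fun q => PySem.Str.startswith q L) ps.reverse with
        | some q => simp
        | none =>
            simp only [Option.map_none, Option.none_or]
            cases hp : PySem.Chars.startswith p.toList L.toList <;>
              simp [List.find?, PySem.Str.startswith_eq, hp]
      have comp : ∀ (o : Option String) (b : Bool) (v : String),
          ((if b then some v else none).or o) = (if b then some v else o) := by
        intro o b v; cases b <;> simp
      refine Prod.ext ?_ (Prod.ext ?_ (Prod.ext ?_ ?_)) <;>
        simp only [hlast, Option.or_assoc, comp, pv_stepA_X, pv_stepA_Y, pv_stepA_S, pv_stepA_F]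

-- one line of A's loop appends exactly B's per-line output
lemma pv_line_eq (acc : List String) (raw : String) : pvLineA acc raw = acc ++ pvConvertLine raw := by
  unfold pvLineA pvConvertLine
  by_cases h : (PySem.Str.startswith (PySem.Str.strip raw) "G1" && PySem.Str.isIn "S" (PySem.Str.strip raw)) = true
  · simp only [h, if_true, Bool.not_true, Bool.false_eq_true, if_false, pv_foldA, Option.or_none]
    cases pvLastValue (PySem.Str.split₀ (PySem.Str.strip raw)) "S" <;>
      cases pvLastValue (PySem.Str.split₀ (PySem.Str.strip raw)) "X" <;>
      cases pvLastValue (PySem.Str.split₀ (PySem.Str.strip raw)) "Y" <;>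
      cases pvLastValue (PySem.Str.split₀ (PySem.Str.strip raw)) "F" <;>
      simp only [List.nil_append, List.append_assoc, List.append_nil]
  · simp only [Bool.not_eq_true] at h
    simp only [h, Bool.not_false, Bool.false_eq_true, if_false, if_true]

-- ===== VERDICT (by name: the statement is the Claim_ definition above) =====
theorem convert_to_klipper_format_spec : Claim_equal_convert_to_klipper_format := by
  intro lines hdom
  clear hdom
  unfold Spec_convert_to_klipper_format convert_to_klipper_format convert_to_klipper_format_alt
  suffices h : ∀ acc, List.foldl pvLineA acc lines = acc ++ lines.flatMap pvConvertLine by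
    simpa using h []
  induction lines with
  | nil => intro acc; simp
  | cons l ls ih =>
      intro acc
      rw [List.foldl_cons, pv_line_eq, List.flatMap_cons, ih, List.append_assoc]
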